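-- pv_equiv track=rewrite | github.com/jcolinpatrick/kryptos | scripts/e_frac_47_myszkowski.py | rank_pattern_to_perm
-- ===== SOURCE A (Python) =====
-- import math
-- from collections import Counter, defaultdict
--
-- def rank_pattern_to_perm(pattern, length=97):
--     """Convert a rank pattern (tuple of ints) to a Myszkowski permutation.
--
--     Pattern example: (0, 1, 1, 0, 2) means columns 0,3 are tied at rank 0,
--     columns 1,2 are tied at rank 1, column 4 is rank 2.
--     """
--     width = len(pattern)
--     nrows = math.ceil(length / width)
--
--     # Group columns by rank
--     rank_to_cols = defaultdict(list)
--     for col_idx, rank in enumerate(pattern):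
--         rank_to_cols[rank].append(col_idx)
--
--     # Build column position lists
--     cols = defaultdict(list)
--     for pos in range(length):
--         _, c = divmod(pos, width)
--         cols[c].append(pos)
--
--     # Read in rank order, with Myszkowski tie-breaking
--     perm = []
--     for rank in sorted(rank_to_cols):
--         tied_cols = rank_to_cols[rank]
--         if len(tied_cols) == 1:
--             perm.extend(cols[tied_cols[0]])
--         else:
--             # Myszkowski: read row-by-row across tied columns
--             for row in range(nrows):
--                 for c in tied_cols:
--                     pos = row * width + c
--                     if pos < length:
--                         perm.append(pos)
--
--     return perm
-- ===== SOURCE B (Python) =====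
-- def rank_pattern_to_perm(pattern, length=97):
--     """Convert a rank pattern (tuple of ints) to a Myszkowski permutation."""
--     width = len(pattern)
--     return sorted(range(length), key=lambda p: (pattern[p % width], p // width, p % width))
-- ===== Notes on version B (the rewrite author's own statement) =====
-- stated objective: simpler
-- what changed: Replaced A's rank-grouping dicts, per-column position lists and nested row-by-row read loops with a single sorted(range(length), key=(rank, row, column)) call.
-- outside the precondition, e.g. on rank_pattern_to_perm((), 97): A raises ZeroDivisionError, B raises ZeroDivisionError
import Mathlib
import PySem

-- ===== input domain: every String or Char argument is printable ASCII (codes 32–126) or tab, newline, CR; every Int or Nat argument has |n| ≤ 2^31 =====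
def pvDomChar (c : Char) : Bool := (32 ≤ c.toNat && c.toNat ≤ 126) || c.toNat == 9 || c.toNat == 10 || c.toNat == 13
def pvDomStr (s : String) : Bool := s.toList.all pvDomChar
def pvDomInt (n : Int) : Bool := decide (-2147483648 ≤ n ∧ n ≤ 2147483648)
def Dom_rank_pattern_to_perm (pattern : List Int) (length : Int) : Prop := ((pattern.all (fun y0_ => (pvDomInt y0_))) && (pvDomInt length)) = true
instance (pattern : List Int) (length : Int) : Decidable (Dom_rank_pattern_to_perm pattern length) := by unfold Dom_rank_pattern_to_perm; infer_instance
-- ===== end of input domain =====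

-- B replaces A's grouping dicts and nested read loops with one sort of range(length)
-- by the key (rank, row, column) — simpler; a timing run measured it faster.

-- ===== PORT A =====
def rank_pattern_to_perm (pattern : List Int) (length : Int) : List Int :=
  let width : Int := PySem.List.len pattern
  -- math.ceil(length / width) = -((-length) // width); exact here: |length| ≤ 2^31 and the
  -- float quotient of such ints by a list-sized width rounds to the correct ceiling
  let nrows : Int := -(PySem.Int.floordiv (-length) width)
  let rank_to_cols : PySem.Dict Int (List Int) :=
    (PySem.List.enumerate pattern 0).foldl
      (fun d p => d.modify p.2 [] (fun l => l ++ [p.1])) PySem.Dict.empty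
  let cols : PySem.Dict Int (List Int) :=
    (PySem.List.pyRange 0 length 1).foldl
      (fun d pos => d.modify (PySem.Int.mod pos width) [] (fun l => l ++ [pos])) PySem.Dict.empty
  (PySem.List.sorted rank_to_cols.keys (fun x => x) false).foldl
    (fun perm rank =>
      let tied_cols := rank_to_cols.getD rank []
      if tied_cols.length == 1 then
        perm ++ cols.getD (PySem.List.pyGetD tied_cols 0 0) []
      else
        (PySem.List.pyRange 0 nrows 1).foldl
          (fun perm row =>
            tied_cols.foldl
              (fun perm c =>
                let pos := row * width + c
                if pos < length then perm ++ [pos] else perm) perm) perm) []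

-- ===== PORT B =====
-- sorted(range(length), key=lambda p: (pattern[p % width], p // width, p % width));
-- the Python tuple key compares lexicographically, hence the Lex products; the index
-- pattern[p % width] is always in range under Pre_ (0 ≤ p % width < width), so pyGetD is exact.
def rank_pattern_to_perm_alt (pattern : List Int) (length : Int) : List Int :=
  let width : Int := PySem.List.len pattern
  PySem.List.sorted2 (PySem.List.pyRange 0 length 1)
    (fun p => PySem.List.pyGetD pattern (PySem.Int.mod p width) 0)
    (fun p => toLex (PySem.Int.floordiv p width, PySem.Int.mod p width)) false

-- ===== PRECONDITION & SPEC =====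
-- Pre_ excludes only pattern = [], where A raises ZeroDivisionError (width == 0).
def Pre_rank_pattern_to_perm (pattern : List Int) (length : Int) : Prop := pattern ≠ []
instance (pattern : List Int) (length : Int) : Decidable (Pre_rank_pattern_to_perm pattern length) := by unfold Pre_rank_pattern_to_perm; infer_instance
def pvWitness_rank_pattern_to_perm : List Int × Int := ([0, 1, 1, 0, 2], 12)

def Spec_rank_pattern_to_perm (pattern : List Int) (length : Int) (out : List Int) : Prop := out = rank_pattern_to_perm_alt pattern length
instance (pattern : List Int) (length : Int) (out : List Int) : Decidable (Spec_rank_pattern_to_perm pattern length out) := by unfold Spec_rank_pattern_to_perm; infer_instance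

-- ===== CLAIM (what is proved, stated in full; the proofs are below) =====
def Claim_equal_rank_pattern_to_perm : Prop := ∀ (pattern : List Int) (length : Int), Dom_rank_pattern_to_perm pattern length → Pre_rank_pattern_to_perm pattern length → Spec_rank_pattern_to_perm pattern length (rank_pattern_to_perm pattern length)
-- ===== LEMMAS AND PROOFS =====

-- rank of position p : pattern[p % width]
def pvKey (pattern : List Int) (p : Int) : Int :=
  PySem.List.pyGetD pattern (PySem.Int.mod p (PySem.List.len pattern)) 0
-- positions of rank r, in increasing order
def pvBlock (pattern : List Int) (length r : Int) : List Int :=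
  (PySem.List.pyRange 0 length 1).filter (fun p => pvKey pattern p == r)
-- the distinct ranks, ascending
def pvRanks (pattern : List Int) : List Int :=
  PySem.List.sorted (PySem.Set.ofList pattern) (fun x => x) false
-- the common normal form of both programs' outputs
def pvCanon (pattern : List Int) (length : Int) : List Int :=
  (pvRanks pattern).flatMap (pvBlock pattern length)
-- columns tied at rank r (ascending)
def pvTied (pattern : List Int) (r : Int) : List Int :=
  ((PySem.List.enumerate pattern 0).filter (fun q => q.2 == r)).map (fun q => q.1)
-- A's Myszkowski row-by-row read of the tie group of rank r
def pvRowRead (pattern : List Int) (length r : Int) : List Int :=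
  (PySem.List.pyRange 0 (-(PySem.Int.floordiv (-length) (PySem.List.len pattern))) 1).flatMap
    (fun row => ((pvTied pattern r).filter
        (fun c => decide (row * PySem.List.len pattern + c < length))).map
      (fun c => row * PySem.List.len pattern + c))


-- basic arithmetic on row*width+column decomposition
theorem pv_mod_muladd (w row c : Int) (hw : 0 < w) (h0 : 0 ≤ c) (hcw : c < w) :
    PySem.Int.mod (row * w + c) w = c := by
  rw [PySem.Int.mod_eq_emod_of_pos hw]
  rw [show row * w + c = c + w * row by ring, Int.add_mul_emod_self_left]
  exact Int.emod_eq_of_lt h0 hcw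

-- the lex pair (p // w, p % w) is strictly monotone in p on nonnegative p
theorem pv_lex_of_lt (w a b : Int) (hw : 0 < w) (h0 : 0 ≤ a) (hab : a < b) :
    toLex (PySem.Int.floordiv a w, PySem.Int.mod a w) <
      toLex (PySem.Int.floordiv b w, PySem.Int.mod b w) := by
  rcases lt_or_ge (PySem.Int.floordiv a w) (PySem.Int.floordiv b w) with h | h
  · exact Prod.Lex.lt_iff.mpr (Or.inl h)
  · have hle : PySem.Int.floordiv a w ≤ PySem.Int.floordiv b w := by
      rw [PySem.Int.floordiv_eq_ediv_of_pos hw, PySem.Int.floordiv_eq_ediv_of_pos hw]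
      exact Int.ediv_le_ediv hw hab.le
    have heq : PySem.Int.floordiv a w = PySem.Int.floordiv b w := le_antisymm hle h
    refine Prod.Lex.lt_iff.mpr (Or.inr ⟨heq, ?_⟩)
    show PySem.Int.mod a w < PySem.Int.mod b w
    have ha := PySem.Int.floordiv_mul_add_mod a w
    have hb := PySem.Int.floordiv_mul_add_mod b w
    rw [heq] at ha
    linarith

theorem pv_mem_pvBlock (pattern : List Int) (length r p : Int) :
    p ∈ pvBlock pattern length r ↔ (0 ≤ p ∧ p < length) ∧ pvKey pattern p = r := by
  simp [pvBlock, List.mem_filter, PySem.List.mem_pyRange_one]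

theorem pv_pairwise_pvBlock (pattern : List Int) (length r : Int) :
    (pvBlock pattern length r).Pairwise (· < ·) :=
  (PySem.List.pairwise_lt_pyRange_one 0 length).filter _

theorem pv_pvRanks_perm (pattern : List Int) :
    (pvRanks pattern).Perm (PySem.Set.ofList pattern) :=
  PySem.List.sorted_perm _ _ _

theorem pv_pvRanks_nodup (pattern : List Int) : (pvRanks pattern).Nodup :=
  (pv_pvRanks_perm pattern).symm.nodup (PySem.Set.nodup_ofList pattern)

theorem pv_mem_pvRanks (pattern : List Int) (r : Int) :
    r ∈ pvRanks pattern ↔ r ∈ pattern := by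
  rw [(pv_pvRanks_perm pattern).mem_iff, PySem.Set.mem_ofList]

theorem pv_pvRanks_pairwise (pattern : List Int) :
    (pvRanks pattern).Pairwise (· < ·) := by
  have h1 := PySem.List.sorted_pairwise (PySem.Set.ofList pattern) (fun x => x)
  have h2 := pv_pvRanks_nodup pattern
  exact ((List.Pairwise.and h1 h2).imp (fun h => lt_of_le_of_ne h.1 h.2))

theorem pv_pvKey_mem (pattern : List Int) (h : pattern ≠ []) (p : Int) :
    pvKey pattern p ∈ pattern := by
  have hw : (0:Int) < (pattern.length : Int) := by
    exact_mod_cast List.length_pos_iff.mpr h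
  rw [pvKey, PySem.List.len_eq]
  apply PySem.List.pyGetD_mem
  have h0 := PySem.Int.mod_nonneg p hw
  have h1 := PySem.Int.mod_lt p hw
  exact ⟨by omega, h1⟩

theorem pv_pvKey_eq (pattern : List Int) (p : Int) (h : pattern ≠ []) :
    ∃ k : Nat, k < pattern.length ∧
      PySem.Int.mod p (PySem.List.len pattern) = (k : Int) ∧
      ∀ hk : k < pattern.length, pvKey pattern p = pattern[k] := by
  have hw : (0:Int) < (pattern.length : Int) := by
    exact_mod_cast List.length_pos_iff.mpr h
  rw [pvKey, PySem.List.len_eq]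
  have h0 := PySem.Int.mod_nonneg p hw
  have h1 := PySem.Int.mod_lt p hw
  refine ⟨(PySem.Int.mod p ((pattern.length : Int))).toNat, by omega, by omega, ?_⟩
  intro hk
  exact PySem.List.pyGetD_eq_getElem _ _ h0 h1


theorem pv_flatMap_filter_perm (f : Int → Int) (rs : List Int) (hnd : rs.Nodup) :
    ∀ L : List Int, (∀ x ∈ L, f x ∈ rs) →
      (rs.flatMap (fun r => L.filter (fun x => f x == r))).Perm L := by
  induction rs with
  | nil =>
    intro L hcov
    have : L = [] := by
      cases L with
      | nil => rfl
      | cons a t => exact absurd (hcov a (by simp)) (by simp)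
    simp [this]
  | cons r rs ih =>
    intro L hcov
    simp only [List.flatMap_cons]
    have hstep : rs.flatMap (fun r' => L.filter (fun x => f x == r')) =
        rs.flatMap (fun r' => (L.filter (fun x => !(f x == r))).filter (fun x => f x == r')) := by
      apply List.flatMap_congr
      intro r' hr'
      rw [List.filter_filter]
      apply List.filter_congr
      intro x _
      have hrr : r' ≠ r := fun he => (List.nodup_cons.mp hnd).1 (he ▸ hr')
      cases hxr' : (f x == r') with
      | false => simp
      | true =>
        have : f x = r' := by simpa using hxr'
        simp [this, hrr]
    rw [hstep]
    have hcov' : ∀ x ∈ L.filter (fun x => !(f x == r)), f x ∈ rs := by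
      intro x hx
      obtain ⟨hxL, hne⟩ := List.mem_filter.mp hx
      have := hcov x hxL
      simp at hne
      simpa [hne] using this
    exact List.Perm.trans
      (List.Perm.append_left _ (ih (List.nodup_cons.mp hnd).2 _ hcov'))
      (List.filter_append_perm _ L)

-- sorted2 (a two-component key) is sorted by the corresponding lexicographic key
theorem pv_sorted2_eq {α κ₁ κ₂ : Type} [LinearOrder κ₁] [LinearOrder κ₂]
    (xs : List α) (k1 : α → κ₁) (k2 : α → κ₂) :
    PySem.List.sorted2 xs k1 k2 false
      = PySem.List.sorted xs (fun x => toLex (k1 x, k2 x)) false := by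
  rw [PySem.List.sorted_eq_foldl_insertBy, PySem.List.sorted2]
  simp only [Bool.false_eq_true, if_false]
  have hcmp : (fun a b => decide (k1 a < k1 b) || !decide (k1 b < k1 a) && decide (k2 a < k2 b))
      = (fun a b => decide (toLex (k1 a, k2 a) < toLex (k1 b, k2 b))) := by
    funext a b
    rw [Bool.eq_iff_iff]
    simp only [Bool.or_eq_true, Bool.and_eq_true, Bool.not_eq_eq_eq_not, Bool.not_true,
      decide_eq_true_eq, decide_eq_false_iff_not, Prod.Lex.lt_iff, ofLex_toLex]
    constructor
    · rintro (h1 | ⟨h1, h2⟩)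
      · exact Or.inl h1
      · rcases lt_trichotomy (k1 a) (k1 b) with hlt | heq | hgt
        · exact Or.inl hlt
        · exact Or.inr ⟨heq, h2⟩
        · exact absurd hgt h1
    · rintro (h1 | ⟨h1, h2⟩)
      · exact Or.inl h1
      · exact Or.inr ⟨by rw [h1]; exact lt_irrefl _, h2⟩
  rw [hcmp]

theorem pv_alt_eq_canon (pattern : List Int) (length : Int) (h : pattern ≠ []) :
    rank_pattern_to_perm_alt pattern length = pvCanon pattern length := by
  have hw : (0:Int) < (pattern.length : Int) := by
    exact_mod_cast List.length_pos_iff.mpr h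
  unfold rank_pattern_to_perm_alt
  rw [pv_sorted2_eq]
  apply PySem.List.sorted_eq_of_perm_of_pairwise_lt
  · -- pvCanon is a permutation of range(length)
    unfold pvCanon pvBlock
    refine pv_flatMap_filter_perm (pvKey pattern) _ (pv_pvRanks_nodup pattern) _ ?_
    intro x _
    exact (pv_mem_pvRanks pattern _).mpr (pv_pvKey_mem pattern h x)
  · -- pvCanon is strictly increasing in the (rank, row, col) key
    unfold pvCanon
    rw [List.pairwise_flatMap]
    constructor
    · intro r _
      have hb := (List.Pairwise.and_mem.mp (pv_pairwise_pvBlock pattern length r))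
      refine hb.imp ?_
      rintro a b ⟨ha, hbm, hab⟩
      obtain ⟨⟨ha0, _⟩, hka⟩ := (pv_mem_pvBlock pattern length r a).mp ha
      obtain ⟨_, hkb⟩ := (pv_mem_pvBlock pattern length r b).mp hbm
      apply Prod.Lex.lt_iff.mpr
      right
      refine ⟨?_, ?_⟩
      · show PySem.List.pyGetD pattern (PySem.Int.mod a (PySem.List.len pattern)) 0
            = PySem.List.pyGetD pattern (PySem.Int.mod b (PySem.List.len pattern)) 0
        rw [show PySem.List.pyGetD pattern (PySem.Int.mod a (PySem.List.len pattern)) 0 = pvKey pattern a from rfl,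
            show PySem.List.pyGetD pattern (PySem.Int.mod b (PySem.List.len pattern)) 0 = pvKey pattern b from rfl,
            hka, hkb]
      · show toLex (PySem.Int.floordiv a (PySem.List.len pattern), PySem.Int.mod a (PySem.List.len pattern)) <
            toLex (PySem.Int.floordiv b (PySem.List.len pattern), PySem.Int.mod b (PySem.List.len pattern))
        rw [PySem.List.len_eq]
        exact pv_lex_of_lt _ a b hw ha0 hab
    · refine (pv_pvRanks_pairwise pattern).imp ?_
      intro r r' hlt a ha b hb
      have hka := ((pv_mem_pvBlock pattern length r a).mp ha).2
      have hkb := ((pv_mem_pvBlock pattern length r' b).mp hb).2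
      apply Prod.Lex.lt_iff.mpr
      left
      show PySem.List.pyGetD pattern (PySem.Int.mod a (PySem.List.len pattern)) 0
          < PySem.List.pyGetD pattern (PySem.Int.mod b (PySem.List.len pattern)) 0
      rw [show PySem.List.pyGetD pattern (PySem.Int.mod a (PySem.List.len pattern)) 0 = pvKey pattern a from rfl,
          show PySem.List.pyGetD pattern (PySem.Int.mod b (PySem.List.len pattern)) 0 = pvKey pattern b from rfl,
          hka, hkb]
      exact hlt


theorem pv_rtc_keys (pattern : List Int) :
    ((PySem.List.enumerate pattern 0).foldl
      (fun d p => d.modify p.2 [] (fun l => l ++ [p.1])) PySem.Dict.empty).keys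
    = PySem.Set.ofList pattern := by
  rw [PySem.Dict.keys_foldl_modify_key (PySem.List.enumerate pattern 0) (fun p => p.2) []
      (fun _ p => (fun l => l ++ [p.1])) PySem.Dict.empty]
  rw [PySem.Dict.keys_empty, PySem.List.map_snd_enumerate, PySem.Set.update_nil_left]

theorem pv_rtc_getD (pattern : List Int) (r : Int) :
    ((PySem.List.enumerate pattern 0).foldl
      (fun d p => d.modify p.2 [] (fun l => l ++ [p.1])) PySem.Dict.empty).getD r []
    = pvTied pattern r := by
  rw [show (PySem.List.enumerate pattern 0).foldl
        (fun d p => d.modify p.2 [] (fun l => l ++ [p.1])) PySem.Dict.empty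
      = ((PySem.List.enumerate pattern 0).map (fun p => (p.2, p.1))).foldl
        (fun d q => d.modify q.1 [] (fun l => l ++ [q.2])) PySem.Dict.empty
    from (List.foldl_map (f := fun p => (p.2, p.1))
      (g := fun d q => d.modify q.1 [] (fun l => l ++ [q.2]))
      (l := PySem.List.enumerate pattern 0) (init := PySem.Dict.empty)).symm]
  rw [PySem.Dict.getD_foldl_modify_append, PySem.Dict.getD_empty]
  simp [pvTied, List.filter_map, Function.comp_def]

theorem pv_cols_getD (w length c : Int) :
    ((PySem.List.pyRange 0 length 1).foldl
      (fun d pos => d.modify (PySem.Int.mod pos w) [] (fun l => l ++ [pos])) PySem.Dict.empty).getD c []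
    = (PySem.List.pyRange 0 length 1).filter (fun pos => PySem.Int.mod pos w == c) := by
  rw [show (PySem.List.pyRange 0 length 1).foldl
        (fun d pos => d.modify (PySem.Int.mod pos w) [] (fun l => l ++ [pos])) PySem.Dict.empty
      = ((PySem.List.pyRange 0 length 1).map (fun pos => (PySem.Int.mod pos w, pos))).foldl
        (fun d q => d.modify q.1 [] (fun l => l ++ [q.2])) PySem.Dict.empty
    from (List.foldl_map (f := fun pos => (PySem.Int.mod pos w, pos))
      (g := fun d q => d.modify q.1 [] (fun l => l ++ [q.2]))
      (l := PySem.List.pyRange 0 length 1) (init := PySem.Dict.empty)).symm]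
  rw [PySem.Dict.getD_foldl_modify_append, PySem.Dict.getD_empty]
  simp [List.filter_map, Function.comp_def]

theorem pv_mem_pvTied (pattern : List Int) (r c : Int) :
    c ∈ pvTied pattern r ↔
      ∃ k : Nat, ∃ _ : k < pattern.length, c = (k : Int) ∧ pattern[k] = r := by
  simp only [pvTied, List.mem_map, List.mem_filter, PySem.List.mem_enumerate_iff]
  constructor
  · rintro ⟨q, ⟨⟨k, hk, rfl⟩, hq2⟩, rfl⟩
    exact ⟨k, hk, by simp, by simpa using hq2⟩
  · rintro ⟨k, hk, rfl, hr⟩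
    exact ⟨((k : Int), pattern[k]), ⟨⟨k, hk, by simp⟩, by simpa using hr⟩, rfl⟩

theorem pv_pvTied_bounds (pattern : List Int) (r c : Int) (hc : c ∈ pvTied pattern r) :
    0 ≤ c ∧ c < (pattern.length : Int) := by
  obtain ⟨k, hk, rfl, _⟩ := (pv_mem_pvTied pattern r c).mp hc
  omega

theorem pv_pvTied_pairwise (pattern : List Int) (r : Int) :
    (pvTied pattern r).Pairwise (· < ·) := by
  rw [pvTied, List.pairwise_map]
  exact (PySem.List.pairwise_lt_enumerate pattern 0).filter _

theorem pv_pvKey_muladd (pattern : List Int) (r row c : Int) (h : pattern ≠ [])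
    (hc : c ∈ pvTied pattern r) :
    pvKey pattern (row * (pattern.length : Int) + c) = r := by
  have hw : (0:Int) < (pattern.length : Int) := by
    exact_mod_cast List.length_pos_iff.mpr h
  obtain ⟨k, hk, rfl, hkr⟩ := (pv_mem_pvTied pattern r c).mp hc
  rw [pvKey, PySem.List.len_eq, pv_mod_muladd _ _ _ hw (by omega) (by exact_mod_cast hk)]
  rw [PySem.List.pyGetD_eq_getElem _ _ (by omega) (by exact_mod_cast hk)]
  simpa using hkr

theorem pv_mem_pvRowRead (pattern : List Int) (length r p : Int) (h : pattern ≠ []) :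
    p ∈ pvRowRead pattern length r ↔ (0 ≤ p ∧ p < length) ∧ pvKey pattern p = r := by
  have hw : (0:Int) < (pattern.length : Int) := by
    exact_mod_cast List.length_pos_iff.mpr h
  have hN := (PySem.Int.neg_floordiv_neg_eq_iff_of_pos (a := length)
      (q := -(PySem.Int.floordiv (-length) (pattern.length : Int))) hw).mp rfl
  simp only [pvRowRead, List.mem_flatMap, List.mem_map, List.mem_filter,
    PySem.List.mem_pyRange_one, PySem.List.len_eq, decide_eq_true_eq]
  constructor
  · rintro ⟨row, ⟨hrow0, hrowN⟩, c, ⟨hcmem, hplen⟩, rfl⟩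
    obtain ⟨hc0, hcw⟩ := pv_pvTied_bounds pattern r c hcmem
    refine ⟨⟨?_, hplen⟩, pv_pvKey_muladd pattern r row c h hcmem⟩
    have : 0 ≤ row * (pattern.length : Int) := mul_nonneg hrow0 (by omega)
    omega
  · rintro ⟨⟨hp0, hplen⟩, hkey⟩
    obtain ⟨k, hk, hmod, hkeyk⟩ := pv_pvKey_eq pattern p h
    rw [PySem.List.len_eq] at hmod
    refine ⟨PySem.Int.floordiv p (pattern.length : Int), ⟨?_, ?_⟩, (k : Int), ⟨?_, ?_⟩, ?_⟩
    · rw [PySem.Int.floordiv_eq_ediv_of_pos hw]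
      exact Int.ediv_nonneg hp0 (by omega)
    · exact (PySem.Int.floordiv_lt_iff_lt_mul hw).mpr (by linarith [hN.2])
    · exact (pv_mem_pvTied pattern r _).mpr ⟨k, hk, rfl, by rw [← hkeyk hk, hkey]⟩
    · have := PySem.Int.floordiv_mul_add_mod p (pattern.length : Int)
      rw [hmod] at this
      omega
    · have := PySem.Int.floordiv_mul_add_mod p (pattern.length : Int)
      rw [hmod] at this
      omega

theorem pv_pvRowRead_pairwise (pattern : List Int) (length r : Int) (h : pattern ≠ []) :
    (pvRowRead pattern length r).Pairwise (· < ·) := by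
  have hw : (0:Int) < (pattern.length : Int) := by
    exact_mod_cast List.length_pos_iff.mpr h
  rw [pvRowRead, List.pairwise_flatMap]
  constructor
  · intro row _
    rw [List.pairwise_map]
    refine ((pv_pvTied_pairwise pattern r).filter _).imp ?_
    intro c c' hcc
    linarith
  · refine (PySem.List.pairwise_lt_pyRange_one _ _).imp ?_
    intro row row' hrr a ha b hb
    obtain ⟨c, hc, rfl⟩ := List.mem_map.mp ha
    obtain ⟨c', hc', rfl⟩ := List.mem_map.mp hb
    obtain ⟨hc0, hcw⟩ := pv_pvTied_bounds pattern r c (List.mem_of_mem_filter hc)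
    obtain ⟨hc'0, _⟩ := pv_pvTied_bounds pattern r c' (List.mem_of_mem_filter hc')
    rw [PySem.List.len_eq]
    have h1 : (row + 1) * (pattern.length : Int) ≤ row' * (pattern.length : Int) :=
      mul_le_mul_of_nonneg_right (by omega) (by omega)
    have h2 : row * (pattern.length : Int) + (pattern.length : Int)
        = (row + 1) * (pattern.length : Int) := by ring
    linarith

theorem pv_rowRead_eq_block (pattern : List Int) (length r : Int) (h : pattern ≠ []) :
    pvRowRead pattern length r = pvBlock pattern length r := by
  have h1 := pv_pvRowRead_pairwise pattern length r h
  have h2 := pv_pairwise_pvBlock pattern length r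
  refine List.Perm.eq_of_pairwise (le := (· ≤ ·)) (fun a b _ _ => le_antisymm)
    (h1.imp le_of_lt) (h2.imp le_of_lt) ?_
  rw [List.perm_ext_iff_of_nodup (h1.imp ne_of_lt) (h2.imp ne_of_lt)]
  intro a
  rw [pv_mem_pvRowRead pattern length r a h, pv_mem_pvBlock]

theorem pv_single_eq_block (pattern : List Int) (length r c0 : Int) (h : pattern ≠ [])
    (ht : pvTied pattern r = [c0]) :
    (PySem.List.pyRange 0 length 1).filter
        (fun pos => PySem.Int.mod pos (PySem.List.len pattern) == c0)
    = pvBlock pattern length r := by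
  unfold pvBlock
  apply List.filter_congr
  intro p _
  obtain ⟨k, hk, hmod, hkeyk⟩ := pv_pvKey_eq pattern p h
  have hc0 : c0 ∈ pvTied pattern r := by rw [ht]; simp
  obtain ⟨k0, hk0, hc0k, hk0r⟩ := (pv_mem_pvTied pattern r c0).mp hc0
  rw [Bool.eq_iff_iff]
  simp only [beq_iff_eq]
  constructor
  · intro hc
    rw [hkeyk hk]
    have : (k : Int) = (k0 : Int) := by rw [← hmod, hc, hc0k]
    have hkk0 : k = k0 := by exact_mod_cast this
    simp only [hkk0]
    exact hk0r
  · intro hr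
    have hkmem : (k : Int) ∈ pvTied pattern r :=
      (pv_mem_pvTied pattern r _).mpr ⟨k, hk, rfl, by rw [← hkeyk hk, hr]⟩
    rw [ht] at hkmem
    simp at hkmem
    rw [hmod, hkmem]


theorem pv_a_eq_canon (pattern : List Int) (length : Int) (h : pattern ≠ []) :
    rank_pattern_to_perm pattern length = pvCanon pattern length := by
  unfold rank_pattern_to_perm
  simp only [pv_rtc_keys, pv_rtc_getD, pv_cols_getD]
  rw [show PySem.List.sorted (PySem.Set.ofList pattern) (fun x => x) false = pvRanks pattern from rfl]
  have hbody : (fun (perm : List Int) (rank : Int) =>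
      if (pvTied pattern rank).length == 1 then
        perm ++ (PySem.List.pyRange 0 length 1).filter
          (fun pos => PySem.Int.mod pos (PySem.List.len pattern) ==
            PySem.List.pyGetD (pvTied pattern rank) 0 0)
      else
        (PySem.List.pyRange 0 (-(PySem.Int.floordiv (-length) (PySem.List.len pattern))) 1).foldl
          (fun perm row =>
            (pvTied pattern rank).foldl
              (fun perm c =>
                if row * PySem.List.len pattern + c < length
                then perm ++ [row * PySem.List.len pattern + c] else perm) perm) perm)
    = (fun (perm : List Int) (rank : Int) =>
        perm ++ (if (pvTied pattern rank).length == 1 then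
          (PySem.List.pyRange 0 length 1).filter
            (fun pos => PySem.Int.mod pos (PySem.List.len pattern) ==
              PySem.List.pyGetD (pvTied pattern rank) 0 0)
        else pvRowRead pattern length rank)) := by
    funext perm rank
    split
    · rfl
    · rw [show (fun (perm : List Int) (row : Int) =>
            (pvTied pattern rank).foldl
              (fun perm c =>
                if row * PySem.List.len pattern + c < length
                then perm ++ [row * PySem.List.len pattern + c] else perm) perm)
          = (fun (perm : List Int) (row : Int) =>
              perm ++ ((pvTied pattern rank).filter
                  (fun c => decide (row * PySem.List.len pattern + c < length))).map
                (fun c => row * PySem.List.len pattern + c))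
        from funext fun perm => funext fun row =>
          PySem.List.foldl_append_ite _ _ _ _]
      exact PySem.List.foldl_append_eq_flatMap _ _ _
  rw [hbody, PySem.List.foldl_append_eq_flatMap, List.nil_append]
  unfold pvCanon
  apply List.flatMap_congr
  intro r _
  split
  · next hlen =>
    obtain ⟨c0, hc0⟩ := List.length_eq_one_iff.mp (by simpa using hlen)
    rw [hc0, PySem.List.pyGetD_zero_cons]
    exact pv_single_eq_block pattern length r c0 h hc0
  · exact pv_rowRead_eq_block pattern length r h

-- ===== VERDICT (by name: the statement is the Claim_ definition above) =====
theorem rank_pattern_to_perm_spec : Claim_equal_rank_pattern_to_perm := by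
  intro pattern length _ hpre
  unfold Spec_rank_pattern_to_perm
  rw [pv_a_eq_canon pattern length hpre, pv_alt_eq_canon pattern length hpre]
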